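-- pv_equiv track=rewrite | github.com/edelille/csce790-neuromorphic-project | nn-dev/gen_encodings.py | diag_grad
-- ===== SOURCE A (Python) =====
-- def diag_grad(keys):
--
--     dim = int(len(keys)**.5)
--     dg = []
--     row = [0] * dim
--     index = 0
--     for a in range(0, dim):
--         dg.append(row.copy())
--     for a in range(0, dim):
--         x = a
--         y = 0
--         for b in range(0, a + 1):
--             dg[x][y] = index
--             x -= 1
--             y += 1
--             index += 1
--     for a in range(0, dim-1):
--         x = dim - 1
--         y = a + 1
--         for b in range(0, dim-a-1):
--             dg[x][y] = index
--             x -= 1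
--             y += 1
--             index += 1
--     for a in range(0, dim):
--         for b in range(0, dim):
--             dg[a][b] = keys[dg[a][b]]
--     dg_string = []
--     for row in dg:
--         dg_string.append('\t'.join(row))
--     dg_string = '\n'.join(dg_string)
--     return dg_string
-- ===== SOURCE B (Python) =====
-- def diag_grad(keys):
--     dim = int(len(keys) ** .5)
--
--     def cell(row, col):
--         d = row + col
--         before = d * (d + 1) // 2 if d < dim else dim * dim - (2 * dim - 1 - d) * (2 * dim - d) // 2
--         return keys[before + min(d, dim - 1) - row]
--
--     return '\n'.join('\t'.join(cell(r, c) for c in range(dim)) for r in range(dim))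
-- ===== Notes on version B (the rewrite author's own statement) =====
-- stated objective: alternative
-- what changed: Replaces the three mutation passes over an intermediate integer grid (diagonal fill up-left triangle, diagonal fill down-right triangle, in-place key substitution) by a single per-cell closed-form anti-diagonal index formula evaluated inside one row/column comprehension.
import Mathlib
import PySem

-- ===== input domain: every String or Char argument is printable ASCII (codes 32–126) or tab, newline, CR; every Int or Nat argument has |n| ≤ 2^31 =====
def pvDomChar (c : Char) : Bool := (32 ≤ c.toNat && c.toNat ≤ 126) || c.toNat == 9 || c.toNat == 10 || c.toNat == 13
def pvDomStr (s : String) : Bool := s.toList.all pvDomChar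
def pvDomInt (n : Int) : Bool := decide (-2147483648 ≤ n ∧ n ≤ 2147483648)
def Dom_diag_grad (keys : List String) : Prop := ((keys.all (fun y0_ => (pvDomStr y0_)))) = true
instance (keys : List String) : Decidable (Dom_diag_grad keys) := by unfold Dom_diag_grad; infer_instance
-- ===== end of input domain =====

-- B replaces A's three grid-mutation passes by a per-cell closed-form index formula (alternative decomposition, similar cost).

-- ===== PORT A =====
-- dg[x][y] = v  (x and y are in range at every write A performs, so plain List.set is exact here)
def pvSet2 (g : List (List Nat)) (x y v : Nat) : List (List Nat) :=
  g.set x ((g.getD x []).set y v)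

-- one iteration of A's inner diagonal loops: dg[x][y] = index; x -= 1; y += 1; index += 1
-- (state (g, x, y, index); every one of these Python ints is ≥ 0 whenever it is read, so Nat is exact;
--  x - 1 clamps at 0 only after the final write of an inner loop, where Python's x = -1 is never read)
def pvStep1 (s : List (List Nat) × Nat × Nat × Nat) (_b : Nat) : List (List Nat) × Nat × Nat × Nat :=
  (pvSet2 s.1 s.2.1 s.2.2.1 s.2.2.2, s.2.1 - 1, s.2.2.1 + 1, s.2.2.2 + 1)

-- body of 'for a in range(0, dim)': x = a; y = 0; for b in range(0, a + 1): …
def pvBody1 (s : List (List Nat) × Nat) (a : Nat) : List (List Nat) × Nat :=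
  let t := (List.range (a + 1)).foldl pvStep1 (s.1, a, 0, s.2)
  (t.1, t.2.2.2)

-- body of 'for a in range(0, dim-1)': x = dim - 1; y = a + 1; for b in range(0, dim - a - 1): …
def pvBody2 (dim : Nat) (s : List (List Nat) × Nat) (a : Nat) : List (List Nat) × Nat :=
  let t := (List.range (dim - a - 1)).foldl pvStep1 (s.1, dim - 1, a + 1, s.2)
  (t.1, t.2.2.2)

def diag_grad (keys : List String) : String :=
  -- dim = int(len(keys)**.5): the floor square root (exact for every feasible list length)
  let dim : Nat := keys.length.sqrt
  let row : List Nat := List.replicate dim 0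
  -- for a in range(0, dim): dg.append(row.copy())
  let dg0 : List (List Nat) := (List.range dim).foldl (fun g _ => g ++ [row]) []
  -- first diagonal pass (index starts at 0)
  let s1 := (List.range dim).foldl pvBody1 (dg0, 0)
  -- second diagonal pass
  let s2 := (List.range (dim - 1)).foldl (pvBody2 dim) s1
  -- third pass rewrites each of the dim×dim cells in place: dg[a][b] = keys[dg[a][b]] — elementwise;
  -- every stored index is < dim*dim ≤ len(keys), so Python never raises and the getD default is never used
  let dgS : List (List String) := s2.1.map (fun r => r.map (fun i => keys.getD i ""))
  -- for row in dg: dg_string.append('\t'.join(row));  '\n'.join(dg_string)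
  PySem.Str.join "\n" (dgS.map (fun r => PySem.Str.join "\t" r))

-- ===== PORT B =====
-- cell(row, col) of Source B; the keys[...] index is provably < dim*dim ≤ len(keys), so the getD default is never used
def pvCell (keys : List String) (dim row col : Nat) : String :=
  let d := row + col
  let before := if d < dim then d * (d + 1) / 2 else dim * dim - (2 * dim - 1 - d) * (2 * dim - d) / 2
  keys.getD (before + (min d (dim - 1) - row)) ""

def diag_grad_alt (keys : List String) : String :=
  let dim : Nat := keys.length.sqrt
  PySem.Str.join "\n" ((List.range dim).map (fun r =>
    PySem.Str.join "\t" ((List.range dim).map (fun c => pvCell keys dim r c))))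

-- ===== PRECONDITION & SPEC =====
def Spec_diag_grad (keys : List String) (out : String) : Prop := out = diag_grad_alt keys
instance (keys : List String) (out : String) : Decidable (Spec_diag_grad keys out) := by unfold Spec_diag_grad; infer_instance

-- ===== CLAIM (what is proved, stated in full; the proofs are below) =====
def Claim_equal_diag_grad : Prop := ∀ (keys : List String), Dom_diag_grad keys → Spec_diag_grad keys (diag_grad keys)

-- ===== LEMMAS AND PROOFS =====

-- the index A's two diagonal passes leave at cell (r, c) of the dim×dim grid (matches pvCell's arithmetic)
def pvIdx (dim r c : Nat) : Nat :=
  if r + c < dim then (r + c) * (r + c + 1) / 2 + c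
  else dim * dim - (2 * dim - 1 - (r + c)) * (2 * dim - (r + c)) / 2 + (dim - 1 - r)

-- reading dg[r][c] (0 out of range)
def pvGet2 (g : List (List Nat)) (r c : Nat) : Nat := (g.getD r []).getD c 0

-- the grid is dim×dim
def pvShape (dim : Nat) (g : List (List Nat)) : Prop :=
  g.length = dim ∧ ∀ i (h : i < g.length), g[i].length = dim

-- the running index at the start of iteration k of the second pass
def pvS (dim k : Nat) : Nat := dim * dim - (dim - 1 - k) * (dim - k) / 2

lemma pvT_succ (k : Nat) : (k + 1) * (k + 1 + 1) / 2 = k * (k + 1) / 2 + (k + 1) := by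
  obtain ⟨m, hm⟩ := Nat.even_mul_succ_self k
  have h2 : (k + 1) * (k + 1 + 1) = k * (k + 1) + 2 * (k + 1) := by ring
  omega

lemma pvS_zero (dim : Nat) : pvS dim 0 = dim * (dim + 1) / 2 := by
  unfold pvS
  cases dim with
  | zero => rfl
  | succ n =>
    obtain ⟨m, hm⟩ := Nat.even_mul_succ_self n
    have h1 : (n + 1 - 1 - 0) * (n + 1 - 0) = n * (n + 1) := by simp
    have h2 : (n + 1) * (n + 1 + 1) = n * (n + 1) + 2 * (n + 1) := by ring
    have h3 : (n + 1) * (n + 1) = n * (n + 1) + (n + 1) := by ring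
    omega

lemma pvS_succ (dim k : Nat) (h : k + 1 ≤ dim) : pvS dim (k + 1) = pvS dim k + (dim - k - 1) := by
  unfold pvS
  obtain ⟨m, hm⟩ : ∃ m, dim - 1 - k = m ∧ dim - k = m + 1 := ⟨dim - 1 - k, rfl, by omega⟩
  obtain ⟨hm1, hm2⟩ := hm
  rw [hm1, hm2]
  have hm3 : dim - 1 - (k + 1) = m - 1 := by omega
  have hm4 : dim - (k + 1) = m := by omega
  rw [hm3, hm4]
  have hmd : m < dim := by omega
  cases m with
  | zero => simp
  | succ q =>
    have h1 : (q + 1 - 1) * (q + 1) = q * (q + 1) := by simp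
    obtain ⟨s, hs⟩ := Nat.even_mul_succ_self q
    have h2 : (q + 1) * (q + 1 + 1) = q * (q + 1) + 2 * (q + 1) := by ring
    have hle : (q + 1) * (q + 1 + 1) ≤ 2 * (dim * dim) := by
      calc (q + 1) * (q + 1 + 1) ≤ dim * (dim + 1) := Nat.mul_le_mul (by omega) (by omega)
        _ ≤ 2 * (dim * dim) := by nlinarith
    omega

lemma pvShape_replicate (dim : Nat) : pvShape dim (List.replicate dim (List.replicate dim 0)) := by
  constructor
  · simp
  · intro i h; simp

lemma pvGet2_replicate (dim r c : Nat) :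
    pvGet2 (List.replicate dim (List.replicate dim 0)) r c = 0 := by
  simp [pvGet2, List.getD, List.getElem?_replicate]
  split <;> simp

lemma pvShape_set2 {dim : Nat} {g : List (List Nat)} (hs : pvShape dim g) (x y v : Nat) :
    pvShape dim (pvSet2 g x y v) := by
  obtain ⟨h1, h2⟩ := hs
  refine ⟨by simp [pvSet2, h1], ?_⟩
  intro i hi
  simp only [pvSet2, List.length_set] at hi ⊢
  rw [List.getElem_set]
  split
  · next hx =>
    have hxl : x < g.length := hx ▸ hi
    rw [List.length_set, List.getD_eq_getElem _ _ hxl]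
    exact h2 x hxl
  · exact h2 i hi

lemma pvGet2_set2 {dim : Nat} {g : List (List Nat)} (hs : pvShape dim g)
    {x y : Nat} (hx : x < dim) (hy : y < dim) (v r c : Nat) :
    pvGet2 (pvSet2 g x y v) r c = if r = x ∧ c = y then v else pvGet2 g r c := by
  obtain ⟨h1, h2⟩ := hs
  have hxl : x < g.length := by omega
  have hrow : (g.getD x []).length = dim := by rw [List.getD_eq_getElem _ _ hxl]; exact h2 x hxl
  simp only [pvGet2, pvSet2, List.getD, List.getElem?_set]
  by_cases hr : x = r
  · subst hr
    simp only [if_pos hxl, if_true, Option.getD_some, List.getElem?_set]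
    have hyl : y < (g[x]?.getD []).length := by simp only [List.getD] at hrow; omega
    by_cases hc : y = c
    · subst hc
      simp [hyl]
    · simp [if_neg hc, show ¬(c = y) from fun h => hc h.symm]
  · have hne : ¬(r = x ∧ c = y) := fun h => hr h.1.symm
    simp [if_neg hr, if_neg hne]

lemma pvInner_run (dim : Nat) (n : Nat) :
    ∀ (g : List (List Nat)) (x y i : Nat), pvShape dim g → n ≤ x + 1 → x < dim → y + n ≤ dim →
    ((List.range n).foldl pvStep1 (g, x, y, i)).2 = (x - n, y + n, i + n) ∧
    pvShape dim ((List.range n).foldl pvStep1 (g, x, y, i)).1 ∧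
    ∀ r c, pvGet2 ((List.range n).foldl pvStep1 (g, x, y, i)).1 r c =
      if r + c = x + y ∧ y ≤ c ∧ c < y + n then i + (c - y) else pvGet2 g r c := by
  induction n with
  | zero =>
    intro g x y i hs _ _ _
    refine ⟨by simp, by simpa using hs, ?_⟩
    intro r c
    rw [if_neg (by omega)]
    simp
  | succ n ih =>
    intro g x y i hs hn hx hyn
    obtain ⟨ih2, ihs, ihg⟩ := ih g x y i hs (by omega) hx (by omega)
    have hxn : n ≤ x := by omega
    rw [List.range_succ, List.foldl_append]
    set prev := (List.range n).foldl pvStep1 (g, x, y, i) with hprev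
    have h21 : prev.2.1 = x - n := by rw [ih2]
    have h221 : prev.2.2.1 = y + n := by rw [ih2]
    have h222 : prev.2.2.2 = i + n := by rw [ih2]
    simp only [List.foldl_cons, List.foldl_nil, pvStep1, h21, h221, h222]
    refine ⟨by simp; omega, pvShape_set2 ihs _ _ _, ?_⟩
    intro r c
    rw [pvGet2_set2 ihs (by omega) (by omega), ihg r c]
    by_cases h1 : r = x - n ∧ c = y + n
    · rw [if_pos h1, if_pos (by omega)]
      omega
    · rw [if_neg h1]
      by_cases h2 : r + c = x + y ∧ y ≤ c ∧ c < y + n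
      · rw [if_pos h2, if_pos (by omega)]
      · rw [if_neg h2, if_neg (by omega)]

lemma pvLoop1_run (dim : Nat) (k : Nat) (hk : k ≤ dim) :
    pvShape dim ((List.range k).foldl pvBody1 (List.replicate dim (List.replicate dim 0), 0)).1 ∧
    ((List.range k).foldl pvBody1 (List.replicate dim (List.replicate dim 0), 0)).2 = k * (k + 1) / 2 ∧
    ∀ r c, pvGet2 ((List.range k).foldl pvBody1 (List.replicate dim (List.replicate dim 0), 0)).1 r c =
      if r + c < k then (r + c) * (r + c + 1) / 2 + c else 0 := by
  induction k with
  | zero =>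
    refine ⟨by simpa using pvShape_replicate dim, by simp, ?_⟩
    intro r c
    rw [if_neg (by omega)]
    simpa using pvGet2_replicate dim r c
  | succ k ih =>
    obtain ⟨ihs, ih2, ihg⟩ := ih (by omega)
    rw [List.range_succ, List.foldl_append]
    set prev := (List.range k).foldl pvBody1 (List.replicate dim (List.replicate dim 0), 0) with hprev
    obtain ⟨ht2, hts, htg⟩ := pvInner_run dim (k + 1) prev.1 k 0 prev.2 ihs (by omega) (by omega) (by omega)
    simp only [List.foldl_cons, List.foldl_nil, pvBody1]
    refine ⟨hts, ?_, ?_⟩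
    · show ((List.range (k + 1)).foldl pvStep1 (prev.1, k, 0, prev.2)).2.2.2 = _
      rw [ht2, ih2]
      exact (pvT_succ k).symm
    · intro r c
      rw [htg r c, ihg r c]
      by_cases h1 : r + c = k
      · rw [if_pos (by omega), if_pos (by omega), ih2, h1]
        omega
      · rw [if_neg (by omega)]
        by_cases h2 : r + c < k
        · rw [if_pos h2, if_pos (by omega)]
        · rw [if_neg h2, if_neg (by omega)]

lemma pvLoop2_run (dim : Nat) (k : Nat) (hk : k ≤ dim - 1) :
    pvShape dim ((List.range k).foldl (pvBody2 dim)
        ((List.range dim).foldl pvBody1 (List.replicate dim (List.replicate dim 0), 0))).1 ∧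
    ((List.range k).foldl (pvBody2 dim)
        ((List.range dim).foldl pvBody1 (List.replicate dim (List.replicate dim 0), 0))).2 = pvS dim k ∧
    ∀ r c, pvGet2 ((List.range k).foldl (pvBody2 dim)
        ((List.range dim).foldl pvBody1 (List.replicate dim (List.replicate dim 0), 0))).1 r c =
      if r + c < dim ∨ (r + c < dim + k ∧ r < dim ∧ c < dim) then pvIdx dim r c else 0 := by
  induction k with
  | zero =>
    obtain ⟨hs1, h21, hg1⟩ := pvLoop1_run dim dim le_rfl
    refine ⟨by simpa using hs1, by simpa using h21.trans (pvS_zero dim).symm, ?_⟩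
    intro r c
    simp only [List.range_zero, List.foldl_nil]
    rw [hg1 r c]
    by_cases h : r + c < dim
    · rw [if_pos h, if_pos (by omega), pvIdx, if_pos h]
    · rw [if_neg h, if_neg (by omega)]
  | succ k ih =>
    obtain ⟨ihs, ih2, ihg⟩ := ih (by omega)
    have hdim : k + 2 ≤ dim := by omega
    rw [List.range_succ, List.foldl_append]
    set prev := (List.range k).foldl (pvBody2 dim)
        ((List.range dim).foldl pvBody1 (List.replicate dim (List.replicate dim 0), 0)) with hprev
    obtain ⟨ht2, hts, htg⟩ := pvInner_run dim (dim - k - 1) prev.1 (dim - 1) (k + 1) prev.2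
      ihs (by omega) (by omega) (by omega)
    simp only [List.foldl_cons, List.foldl_nil, pvBody2]
    refine ⟨hts, ?_, ?_⟩
    · show ((List.range (dim - k - 1)).foldl pvStep1 (prev.1, dim - 1, k + 1, prev.2)).2.2.2 = _
      rw [ht2, ih2, pvS_succ dim k (by omega)]
    · intro r c
      rw [htg r c, ihg r c]
      by_cases h1 : r + c = (dim - 1) + (k + 1) ∧ k + 1 ≤ c ∧ c < (k + 1) + (dim - k - 1)
      · rw [if_pos h1, if_pos (by omega), ih2]
        have e1 : 2 * dim - 1 - (r + c) = dim - 1 - k := by omega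
        have e2 : 2 * dim - (r + c) = dim - k := by omega
        rw [pvIdx, if_neg (by omega), e1, e2, pvS]
        omega
      · rw [if_neg h1]
        by_cases h2 : r + c < dim ∨ (r + c < dim + k ∧ r < dim ∧ c < dim)
        · rw [if_pos h2, if_pos (by omega)]
        · rw [if_neg h2, if_neg (by omega)]

lemma pvGet2_eq_getElem {g : List (List Nat)} {r c : Nat} (hr : r < g.length)
    (hc : c < g[r].length) : pvGet2 g r c = g[r][c] := by
  rw [pvGet2, List.getD_eq_getElem _ _ hr, List.getD_eq_getElem _ _ hc]

lemma pvGrid_final (dim : Nat) :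
    ((List.range (dim - 1)).foldl (pvBody2 dim)
        ((List.range dim).foldl pvBody1 (List.replicate dim (List.replicate dim 0), 0))).1 =
      (List.range dim).map (fun r => (List.range dim).map (fun c => pvIdx dim r c)) := by
  obtain ⟨⟨hl, hrow⟩, h2, hg⟩ := pvLoop2_run dim (dim - 1) le_rfl
  apply List.ext_getElem
  · simpa using hl
  · intro r h1 h2'
    apply List.ext_getElem
    · simp [hrow r h1]
    · intro c hc1 hc2
      have hrd : r < dim := by simpa [hl] using h1
      have hcd : c < dim := by simpa [hrow r h1] using hc1
      rw [← pvGet2_eq_getElem h1 hc1, hg r c, if_pos (by omega)]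
      simp

lemma pvCell_eq (keys : List String) (dim r c : Nat) (_hr : r < dim) (hc : c < dim) :
    pvCell keys dim r c = keys.getD (pvIdx dim r c) "" := by
  simp only [pvCell, pvIdx]
  split_ifs with h
  · rw [show min (r + c) (dim - 1) - r = c from by omega]
  · rw [show min (r + c) (dim - 1) = dim - 1 from by omega]

lemma pvDg0_eq (dim : Nat) (row : List Nat) :
    (List.range dim).foldl (fun g _ => g ++ [row]) [] = List.replicate dim row := by
  rw [PySem.List.foldl_append_singleton_eq_map]
  simp

-- ===== VERDICT (by name: the statement is the Claim_ definition above) =====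
theorem diag_grad_spec : Claim_equal_diag_grad := by
  intro keys _
  unfold Spec_diag_grad
  show diag_grad keys = diag_grad_alt keys
  simp only [diag_grad, diag_grad_alt]
  rw [pvDg0_eq, pvGrid_final]
  simp only [List.map_map]
  apply congrArg
  apply List.map_congr_left
  intro r hrm
  have hr : r < keys.length.sqrt := List.mem_range.mp hrm
  simp only [Function.comp_apply, List.map_map]
  apply congrArg
  apply List.map_congr_left
  intro c hcm
  have hc : c < keys.length.sqrt := List.mem_range.mp hcm
  exact (pvCell_eq keys _ r c hr hc).symm
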